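-- pv_equiv track=rewrite | github.com/silver7i/CarpeDiem | EunJi-Kim/February/2_week/14th-15th_weekend/b2309-7dwarf.py | check_dwarfs_height
-- ===== SOURCE A (Python) =====
-- def check_dwarfs_height(arr, found_dwarfs):
--     if len(found_dwarfs) == 7:
--         if sum(found_dwarfs) == 100:
--             return True
--         else:
--             return False
--
--     for i in range(len(arr)):
--         found_dwarfs.append(arr[i])
--         if check_dwarfs_height(arr[i+1:], found_dwarfs):
--             return True
--         found_dwarfs.pop()
--     return False
-- ===== SOURCE B (Python) =====
-- def check_dwarfs_height(arr, found_dwarfs):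
--     # Return-value equivalent to A (A temporarily mutates found_dwarfs; B does not).
--     k = 7 - len(found_dwarfs)
--     if k < 0:
--         return False
--     target = 100 - sum(found_dwarfs)
--     layers = [{0}] + [set() for _ in range(k)]
--     for x in arr:
--         layers = [layers[0]] + [layers[j] | {s + x for s in layers[j - 1]}
--                                 for j in range(1, k + 1)]
--     return target in layers[k]
-- ===== Notes on version B (the rewrite author's own statement) =====
-- stated objective: faster
-- what changed: Replaces the O(C(n,7)) backtracking DFS over all 7-element combinations with a layered subset-sum dynamic program (sets of achievable sums per chosen-count), O(n*k*|sums|); also B does not mutate found_dwarfs, only the return value is claimed.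
import Mathlib
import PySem

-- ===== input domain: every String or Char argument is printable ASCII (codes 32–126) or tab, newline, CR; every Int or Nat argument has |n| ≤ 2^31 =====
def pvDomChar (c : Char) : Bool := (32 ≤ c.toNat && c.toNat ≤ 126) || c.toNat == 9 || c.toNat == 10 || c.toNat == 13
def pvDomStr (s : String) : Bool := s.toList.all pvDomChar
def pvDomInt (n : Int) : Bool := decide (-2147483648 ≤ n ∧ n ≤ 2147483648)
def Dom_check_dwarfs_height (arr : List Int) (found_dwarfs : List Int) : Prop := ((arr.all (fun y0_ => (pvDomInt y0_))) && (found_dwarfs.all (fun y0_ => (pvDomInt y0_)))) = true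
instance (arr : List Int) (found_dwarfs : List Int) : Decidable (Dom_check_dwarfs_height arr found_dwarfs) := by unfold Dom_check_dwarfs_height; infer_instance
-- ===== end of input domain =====

-- B replaces A's O(C(n,7)) backtracking DFS by a layered subset-sum DP; equivalence is about
-- the RETURN value only (A temporarily appends/pops on found_dwarfs, B never mutates it).

-- ===== PORT A =====
-- A's `for i in range(len(arr))` with recursion on arr[i+1:] and append/pop backtracking,
-- rendered as the include/skip recursion it performs (i = 0 case, then the rest of the loop).
def check_dwarfs_height (arr : List Int) (found_dwarfs : List Int) : Bool :=
  if found_dwarfs.length = 7 then found_dwarfs.sum == 100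
  else
    match arr with
    | [] => false
    | x :: rest =>
      if check_dwarfs_height rest (found_dwarfs ++ [x]) then true
      else check_dwarfs_height rest found_dwarfs

-- ===== PORT B =====
-- one entry of the comprehension: layers[j] | {s + x for s in layers[j-1]}, chained over j
def pvLayerStep (x : Int) (prev : PySem.Set Int) : List (PySem.Set Int) → List (PySem.Set Int)
  | [] => []
  | l :: ls => PySem.Set.union l (PySem.Set.ofList (prev.map (fun s => s + x))) :: pvLayerStep x l ls

-- layers = [layers[0]] + [layers[j] | {s+x for s in layers[j-1]} for j in range(1, k+1)]
def pvStep (x : Int) (layers : List (PySem.Set Int)) : List (PySem.Set Int) :=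
  match layers with
  | [] => []
  | l0 :: rest => l0 :: pvLayerStep x l0 rest

def check_dwarfs_height_alt (arr : List Int) (found_dwarfs : List Int) : Bool :=
  let k : Int := 7 - found_dwarfs.length
  if k < 0 then false
  else
    let target : Int := 100 - found_dwarfs.sum
    let layers0 : List (PySem.Set Int) :=
      PySem.Set.ofList [(0 : Int)] :: List.replicate k.toNat PySem.Set.empty
    let layers := arr.foldl (fun ls x => pvStep x ls) layers0
    PySem.Set.contains (layers.getD k.toNat PySem.Set.empty) target

-- ===== PRECONDITION & SPEC =====
def Spec_check_dwarfs_height (arr : List Int) (found_dwarfs : List Int) (out : Bool) : Prop := out = check_dwarfs_height_alt arr found_dwarfs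
instance (arr : List Int) (found_dwarfs : List Int) (out : Bool) : Decidable (Spec_check_dwarfs_height arr found_dwarfs out) := by unfold Spec_check_dwarfs_height; infer_instance

-- ===== CLAIM (what is proved, stated in full; the proofs are below) =====
def Claim_equal_check_dwarfs_height : Prop := ∀ (arr : List Int) (found_dwarfs : List Int), Dom_check_dwarfs_height arr found_dwarfs → Spec_check_dwarfs_height arr found_dwarfs (check_dwarfs_height arr found_dwarfs)

-- ===== LEMMAS AND PROOFS =====

-- "some sublist of `pre` has length j and sum s"
def pvReach (pre : List Int) (j : Nat) (s : Int) : Prop :=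
  ∃ l, List.Sublist l pre ∧ l.length = j ∧ l.sum = s

theorem pvReach_zero (pre : List Int) (s : Int) : pvReach pre 0 s ↔ s = 0 := by
  constructor
  · rintro ⟨l, _, hl, hs⟩
    rcases List.length_eq_zero_iff.mp hl with rfl
    simpa using hs.symm
  · rintro rfl
    exact ⟨[], List.nil_sublist _, rfl, rfl⟩

theorem pv_sublist_concat (l pre : List Int) (x : Int) :
    List.Sublist l (pre ++ [x]) ↔ List.Sublist l pre ∨ ∃ r, l = r ++ [x] ∧ List.Sublist r pre := by
  constructor
  · intro h
    have h' := h.reverse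
    simp only [List.reverse_append, List.reverse_cons, List.reverse_nil, List.nil_append,
      List.singleton_append] at h'
    rcases List.sublist_cons_iff.mp h' with h2 | ⟨r, hr, hs⟩
    · left; have := h2.reverse; simpa using this
    · right
      refine ⟨r.reverse, ?_, by simpa using hs.reverse⟩
      have : l.reverse.reverse = (x :: r).reverse := by rw [hr]
      simpa using this
  · rintro (h | ⟨r, rfl, hs⟩)
    · exact h.trans (List.sublist_append_left _ _)
    · exact hs.append (List.Sublist.refl _)

theorem pvA_iff (arr : List Int) : ∀ fd : List Int,
    check_dwarfs_height arr fd = true ↔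
      ∃ l, List.Sublist l arr ∧ l.length + fd.length = 7 ∧ fd.sum + l.sum = 100 := by
  induction arr with
  | nil =>
    intro fd
    rw [check_dwarfs_height]
    by_cases h7 : fd.length = 7
    · simp only [h7]
      constructor
      · intro h; exact ⟨[], List.nil_sublist _, by simp, by simpa using h⟩
      · rintro ⟨l, hl, hlen, hsum⟩
        rcases List.eq_nil_of_sublist_nil hl with rfl
        simpa using hsum
    · simp only [if_neg h7]
      constructor
      · intro h; exact absurd h (by simp)
      · rintro ⟨l, hl, hlen, _⟩
        rcases List.eq_nil_of_sublist_nil hl with rfl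
        exact absurd hlen (by simpa using h7)
  | cons x rest ih =>
    intro fd
    rw [check_dwarfs_height]
    by_cases h7 : fd.length = 7
    · simp only [h7]
      constructor
      · intro h; exact ⟨[], List.nil_sublist _, by simp, by simpa using h⟩
      · rintro ⟨l, _, hlen, hsum⟩
        have : l = [] := List.length_eq_zero_iff.mp (by omega)
        subst this; simpa using hsum
    · simp only [if_neg h7]
      constructor
      · intro h
        split_ifs at h with h1
        · rcases (ih (fd ++ [x])).mp h1 with ⟨l, hl, hlen, hsum⟩
          refine ⟨x :: l, List.cons_sublist_cons.mpr hl, by simp at hlen ⊢; omega, ?_⟩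
          simp at hsum ⊢; linarith
        · rcases (ih fd).mp h with ⟨l, hl, hlen, hsum⟩
          exact ⟨l, hl.cons _, hlen, hsum⟩
      · rintro ⟨l, hl, hlen, hsum⟩
        rcases List.sublist_cons_iff.mp hl with h2 | ⟨r, rfl, hr⟩
        · have := (ih fd).mpr ⟨l, h2, hlen, hsum⟩
          split_ifs <;> simp [this]
        · have : check_dwarfs_height rest (fd ++ [x]) = true := by
            refine (ih (fd ++ [x])).mpr ⟨r, hr, by simp at hlen ⊢; omega, ?_⟩
            simp at hsum ⊢; linarith
          simp [this]

-- DP invariant: layers has k+1 entries and layers[j] is exactly the set of sums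
-- of j-element sublists of the processed prefix.
def pvInv (pre : List Int) (k : Nat) (layers : List (PySem.Set Int)) : Prop :=
  layers.length = k + 1 ∧
    ∀ j : Nat, j ≤ k → ∀ s : Int, s ∈ layers.getD j PySem.Set.empty ↔ pvReach pre j s

theorem pv_length_layerStep (x : Int) (p : PySem.Set Int) (ls : List (PySem.Set Int)) :
    (pvLayerStep x p ls).length = ls.length := by
  induction ls generalizing p with
  | nil => rfl
  | cons l ls ih => simp [pvLayerStep, ih]

theorem pv_getD_layerStep (x : Int) :
    ∀ (ls : List (PySem.Set Int)) (p : PySem.Set Int) (i : Nat), i < ls.length →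
      (pvLayerStep x p ls).getD i PySem.Set.empty =
        PySem.Set.union (ls.getD i PySem.Set.empty)
          (PySem.Set.ofList (((p :: ls).getD i PySem.Set.empty).map (fun s => s + x))) := by
  intro ls
  induction ls with
  | nil => intro p i h; simp at h
  | cons l ls ih =>
    intro p i h
    cases i with
    | zero => rfl
    | succ n =>
      simp only [pvLayerStep, List.getD_cons_succ]
      exact ih l n (by simpa using h)

theorem pvInv_step (pre : List Int) (k : Nat) (layers : List (PySem.Set Int)) (x : Int)
    (h : pvInv pre k layers) : pvInv (pre ++ [x]) k (pvStep x layers) := by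
  obtain ⟨hlen, hmem⟩ := h
  match layers, hlen with
  | l0 :: rest, hlen =>
    have hrest : rest.length = k := by simpa using hlen
    refine ⟨by simp [pvStep, pv_length_layerStep, hrest], ?_⟩
    intro j hj s
    cases j with
    | zero =>
      simp only [pvStep, List.getD_cons_zero, pvReach_zero]
      have := hmem 0 (Nat.zero_le _) s
      simpa [pvReach_zero] using this
    | succ n =>
      have hn : n < rest.length := by omega
      simp only [pvStep, List.getD_cons_succ]
      rw [pv_getD_layerStep x rest l0 n hn]
      rw [PySem.Set.mem_union]
      have hcur := hmem (n + 1) hj s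
      simp only [List.getD_cons_succ] at hcur
      rw [hcur]
      have hofl : ∀ t : Int,
          t ∈ PySem.Set.ofList (((l0 :: rest).getD n PySem.Set.empty).map (fun s => s + x)) ↔
            ∃ s0, s0 ∈ (l0 :: rest).getD n PySem.Set.empty ∧ t = s0 + x := by
        intro t
        rw [PySem.Set.mem_ofList, List.mem_map]
        constructor
        · rintro ⟨s0, h1, rfl⟩; exact ⟨s0, h1, rfl⟩
        · rintro ⟨s0, h1, rfl⟩; exact ⟨s0, h1, rfl⟩
      rw [hofl]
      have hprev : ∀ s0 : Int, s0 ∈ (l0 :: rest).getD n PySem.Set.empty ↔ pvReach pre n s0 :=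
        fun s0 => hmem n (by omega) s0
      constructor
      · rintro (h1 | ⟨s0, h1, rfl⟩)
        · rcases h1 with ⟨l, hl, hlen', hsum⟩
          exact ⟨l, hl.trans (List.sublist_append_left _ _), hlen', hsum⟩
        · rcases (hprev s0).mp h1 with ⟨l, hl, hlen', hsum⟩
          exact ⟨l ++ [x], (pv_sublist_concat _ _ _).mpr (Or.inr ⟨l, rfl, hl⟩),
            by simp [hlen'], by simp [hsum]⟩
      · rintro ⟨l, hl, hlen', hsum⟩
        rcases (pv_sublist_concat _ _ _).mp hl with h2 | ⟨r, rfl, hr⟩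
        · exact Or.inl ⟨l, h2, hlen', hsum⟩
        · right
          refine ⟨r.sum, (hprev r.sum).mpr ⟨r, hr, by simp at hlen'; omega, rfl⟩, ?_⟩
          simp at hsum; omega

theorem pvInv_foldl (k : Nat) :
    ∀ (arr pre : List Int) (layers : List (PySem.Set Int)), pvInv pre k layers →
      pvInv (pre ++ arr) k (arr.foldl (fun ls x => pvStep x ls) layers) := by
  intro arr
  induction arr with
  | nil => intro pre layers h; simpa using h
  | cons x rest ih =>
    intro pre layers h
    have := ih (pre ++ [x]) (pvStep x layers) (pvInv_step pre k layers x h)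
    simpa using this

theorem pvInv_init (k : Nat) :
    pvInv [] k (PySem.Set.ofList [(0 : Int)] :: List.replicate k PySem.Set.empty) := by
  refine ⟨by simp, ?_⟩
  intro j hj s
  cases j with
  | zero =>
    simp only [List.getD_cons_zero, pvReach_zero]
    constructor
    · intro h; simpa [PySem.Set.ofList, PySem.Set.add, PySem.Set.contains] using h
    · rintro rfl; simp [PySem.Set.ofList, PySem.Set.add, PySem.Set.contains]
  | succ n =>
    simp only [List.getD_cons_succ]
    constructor
    · intro h
      have : (List.replicate k (PySem.Set.empty : PySem.Set Int)).getD n PySem.Set.empty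
          = PySem.Set.empty := by
        rcases Nat.lt_or_ge n k with hlt | hge
        · simp [List.getD_eq_getElem?_getD, hlt]
        · simp [List.getD_eq_getElem?_getD]
      rw [this] at h
      simp [PySem.Set.empty] at h
    · rintro ⟨l, hl, hlen, _⟩
      rcases List.eq_nil_of_sublist_nil hl with rfl
      simp at hlen

theorem pv_main (arr fd : List Int) :
    check_dwarfs_height arr fd = check_dwarfs_height_alt arr fd := by
  rw [Bool.eq_iff_iff, pvA_iff]
  unfold check_dwarfs_height_alt
  by_cases hk : (7 : Int) - fd.length < 0
  · simp only [if_pos hk]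
    constructor
    · rintro ⟨l, _, hlen, _⟩
      exfalso
      omega
    · intro h; simp at h
  · simp only [if_neg hk]
    have hfd : fd.length ≤ 7 := by omega
    have hkt : ((7 : Int) - fd.length).toNat = 7 - fd.length := by omega
    have hinv := pvInv_foldl (7 - fd.length) arr []
      (PySem.Set.ofList [(0 : Int)] :: List.replicate (7 - fd.length) PySem.Set.empty)
      (pvInv_init (7 - fd.length))
    rw [List.nil_append] at hinv
    obtain ⟨_, hmem⟩ := hinv
    rw [PySem.Set.contains_iff, hkt]
    rw [hmem (7 - fd.length) (Nat.le_refl _) (100 - fd.sum)]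
    constructor
    · rintro ⟨l, hl, hlen, hsum⟩
      exact ⟨l, hl, by omega, by omega⟩
    · rintro ⟨l, hl, hlen, hsum⟩
      exact ⟨l, hl, by omega, by omega⟩

-- ===== VERDICT (by name: the statement is the Claim_ definition above) =====
theorem check_dwarfs_height_spec : Claim_equal_check_dwarfs_height := by
  intro arr fd _
  unfold Spec_check_dwarfs_height
  exact pv_main arr fd
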